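-- pv_equiv track=rewrite | github.com/alexer/cc2500-tools | config.py | format_masked_values
-- ===== SOURCE A (Python) =====
-- def format_masked_value(value, bits, width=8):
-- 	ret = ['.'] * width
-- 	for bit in range(width):
-- 		if bit in bits:
-- 			ret[bit] = str((value >> bit) & 1)
-- 	return ''.join(reversed(ret))
--
-- def format_masked_values(old_value, new_value, bits, width=8):
-- 	old = format_masked_value(old_value, bits, width)
-- 	new = format_masked_value(new_value, bits, width)
-- 	colors = [(32 if old_char == new_char else 31) if bit in bits else 0 for bit, (old_char, new_char) in enumerate(reversed(list(zip(old, new))))][::-1]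
-- 	colors = ['\x1b[%dm' % color for color in colors]
-- 	old = ''.join(item for pair in zip(colors, old) for item in pair) + '\x1b[m'
-- 	new = ''.join(item for pair in zip(colors, new) for item in pair) + '\x1b[m'
-- 	return ' '.join([old, new])
-- ===== SOURCE B (Python) =====
-- def format_masked_values(old_value, new_value, bits, width=8):
-- 	old_s = ""
-- 	new_s = ""
-- 	for bit in range(width - 1, -1, -1):
-- 		if bit in bits:
-- 			co = (old_value >> bit) & 1
-- 			cn = (new_value >> bit) & 1
-- 			color = 32 if co == cn else 31
-- 			oc, nc = str(co), str(cn)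
-- 		else:
-- 			color, oc, nc = 0, '.', '.'
-- 		esc = '\x1b[%dm' % color
-- 		old_s += esc + oc
-- 		new_s += esc + nc
-- 	return old_s + '\x1b[m ' + new_s + '\x1b[m'
-- ===== Notes on version B (the rewrite author's own statement) =====
-- stated objective: simpler
-- what changed: Replaced the helper plus the zip/reversed/enumerate/slice color-list passes with one loop over bit positions in display order that computes each bit's color (by comparing the bit values directly) and appends escape+char to both output strings as it goes.
import Mathlib
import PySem

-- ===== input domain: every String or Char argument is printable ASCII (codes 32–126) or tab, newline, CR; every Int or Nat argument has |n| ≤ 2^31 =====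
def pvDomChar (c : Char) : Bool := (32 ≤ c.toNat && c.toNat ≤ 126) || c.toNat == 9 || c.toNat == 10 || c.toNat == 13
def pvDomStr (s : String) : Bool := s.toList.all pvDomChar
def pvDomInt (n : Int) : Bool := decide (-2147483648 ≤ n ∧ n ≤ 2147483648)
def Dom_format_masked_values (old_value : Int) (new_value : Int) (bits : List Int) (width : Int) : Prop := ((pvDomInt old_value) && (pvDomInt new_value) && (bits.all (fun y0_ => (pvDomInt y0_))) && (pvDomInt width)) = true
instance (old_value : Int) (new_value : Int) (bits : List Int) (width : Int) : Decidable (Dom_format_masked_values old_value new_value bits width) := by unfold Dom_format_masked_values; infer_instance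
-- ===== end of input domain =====

-- B replaces A's helper plus the zip/reversed/enumerate/slice color passes with one loop over bit
-- positions in display order, computing color and chars per bit directly (objective: simpler).


-- ===== PORT A =====
-- str((value >> bit) & 1); bit is always ≥ 0 where A evaluates this, so `bit.toNat` is exact
def pvStrBit (value : Int) (bit : Int) : List Char :=
  (PySem.Int.toStr (PySem.Int.band (value >>> bit.toNat) 1)).toList

-- format_masked_value: ret = ['.'] * width; for bit in range(width): if bit in bits: ret[bit] = str(...);
-- return ''.join(reversed(ret))   (each ret entry is a string, modelled as List Char; join = flatten)
def format_masked_value_port (value : Int) (bits : List Int) (width : Int) : List Char :=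
  let ret : List (List Char) := List.replicate width.toNat ['.']
  let ret := (PySem.List.pyRange 0 width 1).foldl
    (fun r bit => if bits.contains bit then PySem.List.pySetD r bit (pvStrBit value bit) else r) ret
  ret.reverse.flatten

def format_masked_values (old_value : Int) (new_value : Int) (bits : List Int) (width : Int) : String :=
  let old := format_masked_value_port old_value bits width
  let new := format_masked_value_port new_value bits width
  let colors : List Int := (PySem.List.enumerate ((old.zip new).reverse) 0).map
    (fun p => if bits.contains p.1 then (if p.2.1 = p.2.2 then (32 : Int) else 31) else 0)
  let colors := (PySem.List.slice? colors none none (-1)).getD []   -- [::-1]; step -1 never fails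
  let colorsS : List (List Char) := colors.map (fun c => '\x1b' :: '[' :: (PySem.Int.toStr c).toList ++ ['m'])
  let old2 := ((colorsS.zip old).flatMap (fun q => q.1 ++ [q.2])) ++ ['\x1b', '[', 'm']
  let new2 := ((colorsS.zip new).flatMap (fun q => q.1 ++ [q.2])) ++ ['\x1b', '[', 'm']
  String.mk (old2 ++ [' '] ++ new2)

-- ===== PORT B =====
def format_masked_values_alt (old_value : Int) (new_value : Int) (bits : List Int) (width : Int) : String :=
  let r := (PySem.List.pyRange (width - 1) (-1) (-1)).foldl
    (fun (acc : List Char × List Char) bit =>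
      let t : Int × List Char × List Char :=
        if bits.contains bit then
          let co := PySem.Int.band (old_value >>> bit.toNat) 1   -- bit ≥ 0 throughout the loop
          let cn := PySem.Int.band (new_value >>> bit.toNat) 1
          ((if co = cn then 32 else 31), (PySem.Int.toStr co).toList, (PySem.Int.toStr cn).toList)
        else (0, ['.'], ['.'])
      let esc := '\x1b' :: '[' :: (PySem.Int.toStr t.1).toList ++ ['m']
      (acc.1 ++ (esc ++ t.2.1), acc.2 ++ (esc ++ t.2.2)))
    ([], [])
  String.mk (r.1 ++ ['\x1b', '[', 'm', ' '] ++ (r.2 ++ ['\x1b', '[', 'm']))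

-- ===== PRECONDITION & SPEC =====
def Spec_format_masked_values (old_value : Int) (new_value : Int) (bits : List Int) (width : Int) (out : String) : Prop := out = format_masked_values_alt old_value new_value bits width
instance (old_value : Int) (new_value : Int) (bits : List Int) (width : Int) (out : String) : Decidable (Spec_format_masked_values old_value new_value bits width out) := by unfold Spec_format_masked_values; infer_instance

-- ===== CLAIM (what is proved, stated in full; the proofs are below) =====
def Claim_equal_format_masked_values : Prop := ∀ (old_value : Int) (new_value : Int) (bits : List Int) (width : Int), Dom_format_masked_values old_value new_value bits width → Spec_format_masked_values old_value new_value bits width (format_masked_values old_value new_value bits width)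

-- ===== LEMMAS AND PROOFS =====

-- the bit value (value >> b) & 1, and the single character str() of it
def pvBitv (v b : Int) : Int := PySem.Int.band (v >>> b.toNat) 1

def pvChr (v : Int) (bits : List Int) (b : Int) : Char :=
  if bits.contains b then (if pvBitv v b = 0 then '0' else '1') else '.'

def pvColor (ov nv : Int) (bits : List Int) (b : Int) : Int :=
  if bits.contains b then (if pvBitv ov b = pvBitv nv b then 32 else 31) else 0

def pvEsc (c : Int) : List Char := '\x1b' :: '[' :: (PySem.Int.toStr c).toList ++ ['m']

theorem pvBitv_cases (v b : Int) : pvBitv v b = 0 ∨ pvBitv v b = 1 := by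
  unfold pvBitv
  rw [PySem.Int.band_one]
  have h1 := PySem.Int.mod_nonneg (v >>> b.toNat) (b := 2) (by norm_num)
  have h2 := PySem.Int.mod_lt (v >>> b.toNat) (b := 2) (by norm_num)
  omega

theorem pvStrBit_singleton (v : Int) (bits : List Int) (b : Int) (h : bits.contains b) :
    pvStrBit v b = [pvChr v bits b] := by
  unfold pvStrBit pvChr pvBitv
  rw [if_pos h]
  rcases pvBitv_cases v b with h0 | h0 <;> unfold pvBitv at h0 <;> rw [h0] <;> decide

theorem pvChr_eq_iff (ov nv : Int) (bits : List Int) (b : Int) (h : bits.contains b) :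
    (pvChr ov bits b = pvChr nv bits b) ↔ pvBitv ov b = pvBitv nv b := by
  unfold pvChr
  rw [if_pos h, if_pos h]
  rcases pvBitv_cases ov b with h0 | h0 <;> rcases pvBitv_cases nv b with h1 | h1 <;>
    rw [h0, h1] <;> simp

-- the set-loop of A's helper, characterised by getElem?
theorem pvSetLoop {α : Type} (f : Int → α) (bits : List Int) (w : Int) :
    ∀ (a : Int) (r : List α), 0 ≤ a → r.length = w.toNat →
      ∀ i : Nat,
        ((PySem.List.pyRange a w 1).foldl
            (fun r bit => if bits.contains bit then PySem.List.pySetD r bit (f bit) else r) r)[i]? =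
          if a ≤ (i : Int) ∧ bits.contains (i : Int) ∧ i < r.length then some (f (i : Int))
          else r[i]? := by
  intro a
  induction hwf : (w - a).toNat using Nat.strong_induction_on generalizing a with
  | _ n ih =>
    intro r ha hr i
    by_cases hlt : a < w
    · rw [PySem.List.pyRange_one_cons hlt]
      simp only [List.foldl_cons]
      set r' := if bits.contains a then PySem.List.pySetD r a (f a) else r with hr'
      have hlen' : r'.length = w.toNat := by
        rw [hr']; split
        · rw [PySem.List.pySetD_of_nonneg r (f a) ha, List.length_set]; exact hr
        · exact hr
      rw [ih (w - (a + 1)).toNat (by omega) (a + 1) rfl r' (by omega) hlen' i]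
      have hr'i : r'[i]? = if (i : Int) = a ∧ bits.contains a ∧ i < r.length then some (f a)
          else r[i]? := by
        rw [hr']
        by_cases hc : bits.contains a
        · rw [if_pos hc, PySem.List.pySetD_of_nonneg r (f a) ha, List.getElem?_set]
          by_cases hia : (i : Int) = a
          · rw [if_pos (by omega)]
            by_cases hir : i < r.length
            · rw [if_pos (by omega), if_pos ⟨hia, hc, hir⟩]
            · rw [if_neg (by omega), if_neg (by tauto), List.getElem?_eq_none (by omega)]
          · rw [if_neg (by omega), if_neg (by tauto)]
        · rw [if_neg hc, if_neg (by tauto)]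
      rw [hr'i]
      have hlr : r'.length = r.length := by rw [hlen', hr]
      rw [hlr]
      by_cases hia : (i : Int) = a
      · have hCi : bits.contains (i : Int) = bits.contains a := by rw [hia]
        rw [if_neg (by rintro ⟨h1, -, -⟩; omega)]
        by_cases hc : bits.contains a
        · by_cases hir : i < r.length
          · rw [if_pos ⟨hia, hc, hir⟩, if_pos ⟨by omega, by rw [hCi]; exact hc, hir⟩, hia]
          · rw [if_neg (by rintro ⟨-, -, h⟩; exact hir h),
              if_neg (by rintro ⟨-, -, h⟩; exact hir h)]
        · rw [if_neg (by rintro ⟨-, h, -⟩; exact hc h),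
            if_neg (by rintro ⟨-, h, -⟩; exact hc (hCi ▸ h))]
      · by_cases hP1 : a + 1 ≤ (i : Int) ∧ bits.contains (i : Int) = true ∧ i < r.length
        · rw [if_pos hP1, if_pos ⟨by omega, hP1.2⟩]
        · rw [if_neg hP1, if_neg (by rintro ⟨h, -, -⟩; exact hia h),
            if_neg (by rintro ⟨h1, h2, h3⟩; exact hP1 ⟨by omega, h2, h3⟩)]
    · rw [PySem.List.pyRange_one_eq_nil (by omega)]
      simp only [List.foldl_nil]
      rw [if_neg]
      rintro ⟨hai, -, hir⟩
      rw [hr] at hir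
      omega

-- A's helper produces exactly the per-bit characters, most significant first
theorem pvHelper_eq (v : Int) (bits : List Int) (w : Int) :
    format_masked_value_port v bits w =
      ((List.range w.toNat).map (fun i : Nat => pvChr v bits (i : Int))).reverse := by
  unfold format_masked_value_port
  simp only []
  have hret : (PySem.List.pyRange 0 w 1).foldl
      (fun r bit => if bits.contains bit then PySem.List.pySetD r bit (pvStrBit v bit) else r)
      (List.replicate w.toNat ['.']) =
      (List.range w.toNat).map (fun i : Nat => [pvChr v bits (i : Int)]) := by
    apply List.ext_getElem?
    intro i
    rw [pvSetLoop (pvStrBit v) bits w 0 _ le_rfl List.length_replicate i]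
    simp only [List.length_replicate, List.getElem?_map, List.getElem?_replicate]
    by_cases hi : i < w.toNat
    · rw [List.getElem?_range hi]
      simp only [Option.map_some]
      by_cases hc : bits.contains (i : Int)
      · rw [if_pos ⟨by omega, hc, hi⟩, pvStrBit_singleton v bits _ hc]
      · rw [if_neg (by tauto), if_pos hi]
        unfold pvChr
        rw [if_neg hc]
    · rw [if_neg (by tauto), if_neg hi, List.getElem?_eq_none (by simpa using hi)]
      rfl
  rw [hret, ← List.map_reverse, ← List.flatMap_def, ← List.map_eq_flatMap, List.map_reverse]

-- enumerate of a map over range, from start 0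
theorem pvEnum_map {α : Type} (f : Nat → α) (n : Nat) :
    PySem.List.enumerate ((List.range n).map f) 0 =
      (List.range n).map (fun i : Nat => ((i : Int), f i)) := by
  induction n with
  | zero => simp
  | succ m ih =>
    rw [List.range_succ, List.map_append, PySem.List.enumerate_append, ih]
    simp [PySem.List.enumerate_cons]

-- the B-side pair fold appends the flatMaps of the two per-bit functions
theorem pvPairFold (f g : Int → List Char) :
    ∀ (l : List Int) (x y : List Char),
      l.foldl (fun acc b => (acc.1 ++ f b, acc.2 ++ g b)) (x, y) =
        (x ++ l.flatMap f, y ++ l.flatMap g) := by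
  intro l
  induction l with
  | nil => simp
  | cons b t ih => intro x y; simp [ih, List.flatMap_cons]

-- A's whole output in canonical form
theorem pvA_canon (ov nv : Int) (bits : List Int) (w : Int) :
    format_masked_values ov nv bits w =
      String.mk
        ((((List.range w.toNat).reverse.flatMap
            (fun i : Nat => pvEsc (pvColor ov nv bits (i : Int)) ++ [pvChr ov bits (i : Int)])) ++ ['\x1b', '[', 'm']) ++ [' '] ++
         (((List.range w.toNat).reverse.flatMap
            (fun i : Nat => pvEsc (pvColor ov nv bits (i : Int)) ++ [pvChr nv bits (i : Int)])) ++ ['\x1b', '[', 'm'])) := by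
  unfold format_masked_values
  simp only [pvHelper_eq, ← List.map_reverse, List.zip_map', List.reverse_reverse,
    List.map_map, pvEnum_map, PySem.List.slice?_none_none_neg_one, Option.getD_some,
    List.flatMap_map]
  have hcol : ∀ i : Nat,
      (if bits.contains (i : Int) then
          (if pvChr ov bits (i : Int) = pvChr nv bits (i : Int) then (32 : Int) else 31)
        else 0) = pvColor ov nv bits (i : Int) := by
    intro i
    unfold pvColor
    by_cases hc : bits.contains (i : Int)
    · rw [if_pos hc, if_pos hc, if_congr (pvChr_eq_iff ov nv bits _ hc) rfl rfl]
    · rw [if_neg hc, if_neg hc]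
  simp only [Function.comp]
  simp only [hcol]
  rfl

-- B's whole output in the same canonical form
theorem pvB_canon (ov nv : Int) (bits : List Int) (w : Int) :
    format_masked_values_alt ov nv bits w =
      String.mk
        ((((List.range w.toNat).reverse.flatMap
            (fun i : Nat => pvEsc (pvColor ov nv bits (i : Int)) ++ [pvChr ov bits (i : Int)])) ++ ['\x1b', '[', 'm']) ++ [' '] ++
         (((List.range w.toNat).reverse.flatMap
            (fun i : Nat => pvEsc (pvColor ov nv bits (i : Int)) ++ [pvChr nv bits (i : Int)])) ++ ['\x1b', '[', 'm'])) := by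
  unfold format_masked_values_alt
  have hbody : (fun (acc : List Char × List Char) (bit : Int) =>
      let t : Int × List Char × List Char :=
        if bits.contains bit then
          let co := PySem.Int.band (ov >>> bit.toNat) 1
          let cn := PySem.Int.band (nv >>> bit.toNat) 1
          ((if co = cn then 32 else 31), (PySem.Int.toStr co).toList, (PySem.Int.toStr cn).toList)
        else (0, ['.'], ['.'])
      let esc := '\x1b' :: '[' :: (PySem.Int.toStr t.1).toList ++ ['m']
      (acc.1 ++ (esc ++ t.2.1), acc.2 ++ (esc ++ t.2.2))) =
      (fun acc b => (acc.1 ++ (pvEsc (pvColor ov nv bits b) ++ [pvChr ov bits b]),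
                     acc.2 ++ (pvEsc (pvColor ov nv bits b) ++ [pvChr nv bits b]))) := by
    funext acc b
    by_cases hc : bits.contains b
    · simp only [if_pos hc]
      rw [show (PySem.Int.toStr (PySem.Int.band (ov >>> b.toNat) 1)).toList = [pvChr ov bits b]
          from pvStrBit_singleton ov bits b hc,
        show (PySem.Int.toStr (PySem.Int.band (nv >>> b.toNat) 1)).toList = [pvChr nv bits b]
          from pvStrBit_singleton nv bits b hc]
      unfold pvColor pvEsc pvBitv
      rw [if_pos hc]
    · simp only [if_neg hc]
      unfold pvColor pvEsc pvChr
      rw [if_neg hc, if_neg hc, if_neg hc]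
  have hrange : PySem.List.pyRange (w - 1) (-1) (-1) =
      ((List.range w.toNat).map (fun k : Nat => (k : Int))).reverse := by
    rw [PySem.List.pyRange_neg_one_eq_reverse, PySem.List.pyRange_one]
    have h1 : (w - 1 + 1 - (-1 + 1)).toNat = w.toNat := by omega
    have h2 : (fun k : Nat => (-1 : Int) + 1 + ↑k) = (fun k : Nat => (k : Int)) := by
      funext k; omega
    rw [h1, h2]
  simp only [hbody, hrange, ← List.map_reverse]
  rw [pvPairFold]
  simp only [List.flatMap_map, List.nil_append]
  simp [List.append_assoc]

-- ===== VERDICT (by name: the statement is the Claim_ definition above) =====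
theorem format_masked_values_spec : Claim_equal_format_masked_values := by
  intro ov nv bits w _
  unfold Spec_format_masked_values
  rw [pvA_canon, pvB_canon]
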